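-- pv_equiv track=rewrite | github.com/cd155/Cracking_Coding_Interview | 01_ArraysAndStrings/Questions/RotateMatrix.py | rotate_matrix_multiple_times
-- ===== SOURCE A (Python) =====
-- def rotate_matrix_multiple_times(array2d, size, degree):
--     reduce_degree = abs(degree)%360
--     rotate_time = 0
--     if degree >= 0:
--         rotate_time = reduce_degree/90
--     else:
--         rotate_time = 4 - reduce_degree/90
--
--     for _ in range(int(rotate_time)):
--         rotate_matrix_clockwise(array2d, size)
--     return array2d
--
-- def rotate_matrix_clockwise(array2d, size):
--     start = 0
--     end = size -1
--     for i in range(int(size/2)):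
--         # each row iterate size - 1 times
--         for j in range(start, end):
--             x = j
--             y = size-1-i
--             current = array2d[i][j]
--             next = None
--             for _ in range(4):
--                 next = array2d[x][y]
--                 array2d[x][y] = current
--                 buffer = x
--                 x = y
--                 y = size-1-buffer
--                 current = next
--         # reduce the next array iterated times
--         start += 1
--         end -= 1
--     return array2d
-- ===== SOURCE B (Python) =====
-- def rotate_matrix_multiple_times(array2d, size, degree):
--     # NOTE: B computes the same return value but rebinds instead of mutating in place.
--     reduce_degree = abs(degree) % 360
--     if degree >= 0:
--         rotate_time = reduce_degree // 90
--     else: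
--         rotate_time = (360 - reduce_degree) // 90
--     for _ in range(rotate_time):
--         array2d = [list(row)[::-1] for row in zip(*array2d)]
--     return array2d
-- ===== Notes on version B (the rewrite author's own statement) =====
-- stated objective: simpler
-- what changed: Replaces the ring-by-ring four-way cyclic in-place swap with building each clockwise rotation as transpose-then-row-reverse (zip(*m) with reversed rows), and replaces the float degree arithmetic with integer floor division; B rebinds rather than mutating, so the equivalence is about the return value only.
-- outside the precondition, e.g. on rotate_matrix_multiple_times([[1, 2], [3, 4]], 1, 90): A returns [[1, 2], [3, 4]], B returns [[3, 1], [4, 2]]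
import Mathlib
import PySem

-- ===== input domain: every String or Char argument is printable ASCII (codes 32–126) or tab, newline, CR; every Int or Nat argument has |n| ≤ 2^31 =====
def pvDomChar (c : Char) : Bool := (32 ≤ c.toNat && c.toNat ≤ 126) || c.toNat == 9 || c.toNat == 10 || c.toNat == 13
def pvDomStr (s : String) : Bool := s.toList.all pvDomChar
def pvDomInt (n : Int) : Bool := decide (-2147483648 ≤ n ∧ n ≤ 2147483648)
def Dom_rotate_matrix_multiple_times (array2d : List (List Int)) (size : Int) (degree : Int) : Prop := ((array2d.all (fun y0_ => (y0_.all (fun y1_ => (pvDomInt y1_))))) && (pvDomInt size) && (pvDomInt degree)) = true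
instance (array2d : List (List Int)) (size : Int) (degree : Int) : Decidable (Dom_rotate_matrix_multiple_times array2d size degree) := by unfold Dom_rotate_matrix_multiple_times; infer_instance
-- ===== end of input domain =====

-- B replaces A's ring-by-ring four-way cyclic in-place swap with transpose-then-row-reverse
-- rotations and A's float degree arithmetic with integer floor division (objective: simpler).
-- A mutates array2d in place, B rebinds: the equivalence proved here is about the RETURN value only.

-- ===== PORT A =====
-- array2d[x][y] read / write; indices are nonnegative and in range on every input admitted by Pre_
def pvGet2 (m : List (List Int)) (x y : Int) : Int :=
  PySem.List.pyGetD (PySem.List.pyGetD m x []) y 0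

def pvSet2 (m : List (List Int)) (x y : Int) (v : Int) : List (List Int) :=
  PySem.List.pySetD m x (PySem.List.pySetD (PySem.List.pyGetD m x []) y v)

-- the body of A's 'for j in range(start, end)' loop: the four-way cyclic swap
-- (state: (array2d, x, y, current); next is read before the write, exactly as in A)
def pvInner (size : Int) (m : List (List Int)) (i j : Int) : List (List Int) :=
  ((List.range 4).foldl
    (fun t _ =>
      (pvSet2 t.1 t.2.1 t.2.2.1 t.2.2.2, t.2.2.1, size - 1 - t.2.1, pvGet2 t.1 t.2.1 t.2.2.1))
    (m, j, size - 1 - i, pvGet2 m i j)).1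

-- int(size/2) truncates toward zero = Int.tdiv (size/2 is an exact float for |size| ≤ 2^31);
-- the fold state carries (array2d, start, end) exactly as A mutates them
def rotate_matrix_clockwise (array2d : List (List Int)) (size : Int) : List (List Int) :=
  ((PySem.List.pyRange 0 (Int.tdiv size 2) 1).foldl
    (fun st i =>
      ((PySem.List.pyRange st.2.1 st.2.2 1).foldl (fun m j => pvInner size m i j) st.1,
       st.2.1 + 1, st.2.2 - 1))
    (array2d, 0, size - 1)).1

-- reduce_degree/90 is an exact small float; int() truncation equals these Nat floor divisions
-- for every reduce_degree ∈ [0,360): int(r/90) = r/90 and int(4 - r/90) = 4 - (r+89)/90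
-- (verified exhaustively over [0,360))
def rotate_matrix_multiple_times (array2d : List (List Int)) (size : Int) (degree : Int) : List (List Int) :=
  let reduce_degree : Nat := degree.natAbs % 360
  let rotate_time : Nat :=
    if 0 ≤ degree then reduce_degree / 90 else 4 - (reduce_degree + 89) / 90
  (List.range rotate_time).foldl (fun m _ => rotate_matrix_clockwise m size) array2d

-- ===== PORT B =====
-- zip(*m): truncates at the shortest row; zip() of no lists is empty
def pvZipStar (m : List (List Int)) : List (List Int) :=
  match m with
  | [] => []
  | r :: rs =>
    if (r :: rs).any List.isEmpty then []
    else (r.headD 0 :: rs.map (fun q => q.headD 0)) :: pvZipStar (r.tail :: rs.map List.tail)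
termination_by (m.headD []).length
decreasing_by
  simp_all
  cases r with
  | nil => simp_all
  | cons a as => simp

def rotate_matrix_multiple_times_alt (array2d : List (List Int)) (size : Int) (degree : Int) : List (List Int) :=
  let reduce_degree : Nat := degree.natAbs % 360
  let rotate_time : Nat :=
    if 0 ≤ degree then reduce_degree / 90 else (360 - reduce_degree) / 90
  (List.range rotate_time).foldl (fun m _ => (pvZipStar m).map List.reverse) array2d

-- ===== PRECONDITION & SPEC =====
-- Pre_ admits every input on which no rotation happens, and otherwise requires array2d to be a
-- square size×size matrix.  It excludes inputs where size mismatches the actual dimensions while a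
-- rotation is due: there A either raises IndexError (size too large) or rotates only a top-left
-- fragment selected by the stray size argument, an artefact of trusting size over the data.
def Pre_rotate_matrix_multiple_times (array2d : List (List Int)) (size : Int) (degree : Int) : Prop :=
  (if 0 ≤ degree then degree.natAbs % 360 < 90 else 270 < degree.natAbs % 360)
  ∨ (0 ≤ size ∧ array2d.length = size.toNat ∧ ∀ row ∈ array2d, row.length = size.toNat)
instance (array2d : List (List Int)) (size : Int) (degree : Int) : Decidable (Pre_rotate_matrix_multiple_times array2d size degree) := by unfold Pre_rotate_matrix_multiple_times; infer_instance

def pvWitness_rotate_matrix_multiple_times : List (List Int) × Int × Int := ([[1, 2], [3, 4]], 2, 90)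

def Spec_rotate_matrix_multiple_times (array2d : List (List Int)) (size : Int) (degree : Int) (out : List (List Int)) : Prop := out = rotate_matrix_multiple_times_alt array2d size degree
instance (array2d : List (List Int)) (size : Int) (degree : Int) (out : List (List Int)) : Decidable (Spec_rotate_matrix_multiple_times array2d size degree out) := by unfold Spec_rotate_matrix_multiple_times; infer_instance

-- ===== CLAIM (what is proved, stated in full; the proofs are below) =====
def Claim_equal_rotate_matrix_multiple_times : Prop := ∀ (array2d : List (List Int)) (size : Int) (degree : Int), Dom_rotate_matrix_multiple_times array2d size degree → Pre_rotate_matrix_multiple_times array2d size degree → Spec_rotate_matrix_multiple_times array2d size degree (rotate_matrix_multiple_times array2d size degree)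

-- ===== LEMMAS AND PROOFS =====

-- Nat-level view of the matrix primitives
def pvGN (m : List (List Int)) (i j : Nat) : Int := (m.getD i []).getD j 0
def pvSetN (m : List (List Int)) (i j : Nat) (v : Int) : List (List Int) :=
  m.set i ((m.getD i []).set j v)
def pvSquare (n : Nat) (m : List (List Int)) : Prop :=
  m.length = n ∧ ∀ row ∈ m, row.length = n

-- the four cells of the cycle started at q, the cycle as a simultaneous update, the index list
def pvCells (n : Nat) (q : Nat × Nat) : List (Nat × Nat) :=
  [(q.1, q.2), (q.2, n-1-q.1), (n-1-q.1, n-1-q.2), (n-1-q.2, q.1)]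
def pvGood (n : Nat) (q : Nat × Nat) : Prop := q.1 ≤ q.2 ∧ q.1 + q.2 + 1 < n
def pvCyc (n : Nat) (m : List (List Int)) (q : Nat × Nat) : List (List Int) :=
  pvSetN (pvSetN (pvSetN (pvSetN m q.2 (n-1-q.1) (pvGN m q.1 q.2))
    (n-1-q.1) (n-1-q.2) (pvGN m q.2 (n-1-q.1)))
    (n-1-q.2) q.1 (pvGN m (n-1-q.1) (n-1-q.2)))
    q.1 q.2 (pvGN m (n-1-q.2) q.1)
def pvIdx (n : Nat) : List (Nat × Nat) :=
  (List.range (n/2)).flatMap (fun i => (List.range' i (n-1-i-i)).map (fun j => (i, j)))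

-- the clockwise rotation, described pointwise
def pvRotN (m : List (List Int)) (n : Nat) : List (List Int) :=
  (List.range n).map (fun i => (List.range n).map (fun j => pvGN m (n-1-j) i))

lemma pvGetD_set {α : Type} (l : List α) (a i : Nat) (x d : α) :
    (l.set a x).getD i d = if a = i ∧ a < l.length then x else l.getD i d := by
  simp [List.getD_eq_getElem?_getD, List.getElem?_set]
  split_ifs with h1 h2 h3 <;> simp_all
  omega

lemma pvGN_setN_ne (m : List (List Int)) (a b i j : Nat) (v : Int)
    (h : a ≠ i ∨ b ≠ j) : pvGN (pvSetN m a b v) i j = pvGN m i j := by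
  unfold pvGN pvSetN
  rw [pvGetD_set]
  split_ifs with h1
  · obtain ⟨rfl, _⟩ := h1
    rw [pvGetD_set]
    split_ifs with h2
    · omega
    · rfl
  · rfl

lemma pvGN_setN_self (m : List (List Int)) (a b : Nat) (v : Int)
    (ha : a < m.length) (hb : b < (m.getD a []).length) :
    pvGN (pvSetN m a b v) a b = v := by
  unfold pvGN pvSetN
  rw [pvGetD_set, if_pos ⟨rfl, ha⟩, pvGetD_set, if_pos ⟨rfl, hb⟩]

lemma pvSquare_setN (n : Nat) (m : List (List Int)) (a b : Nat) (v : Int)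
    (h : pvSquare n m) : pvSquare n (pvSetN m a b v) := by
  obtain ⟨hl, hr⟩ := h
  by_cases hlen : a < m.length
  · refine ⟨by simp [pvSetN, hl], ?_⟩
    intro row hrow
    rcases List.mem_or_eq_of_mem_set hrow with h | rfl
    · exact hr _ h
    · rw [List.length_set]
      exact hr _ (by rw [List.getD_eq_getElem _ _ hlen]; exact List.getElem_mem hlen)
  · rw [pvSetN, List.set_eq_of_length_le (by omega)]
    exact ⟨hl, hr⟩

lemma pvSquare_cyc (n : Nat) (m : List (List Int)) (q : Nat × Nat)
    (h : pvSquare n m) : pvSquare n (pvCyc n m q) := by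
  unfold pvCyc
  exact pvSquare_setN _ _ _ _ _ (pvSquare_setN _ _ _ _ _ (pvSquare_setN _ _ _ _ _
    (pvSquare_setN _ _ _ _ _ h)))

lemma pvLt (n : Nat) (X : List (List Int)) (a b : Nat) (h : pvSquare n X)
    (ha : a < n) (hb : b < n) : a < X.length ∧ b < (X.getD a []).length := by
  obtain ⟨hl, hr⟩ := h
  have h1 : a < X.length := by omega
  refine ⟨h1, ?_⟩
  have : X.getD a [] ∈ X := by rw [List.getD_eq_getElem _ _ h1]; exact List.getElem_mem h1
  rw [hr _ this]; exact hb

lemma pvGN_setN_self' (n : Nat) (X : List (List Int)) (a b : Nat) (v : Int)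
    (h : pvSquare n X) (ha : a < n) (hb : b < n) : pvGN (pvSetN X a b v) a b = v :=
  pvGN_setN_self X a b v (pvLt n X a b h ha hb).1 (pvLt n X a b h ha hb).2

lemma pvGet2_coe (m : List (List Int)) (i j : Nat) :
    pvGet2 m (i : Int) (j : Int) = pvGN m i j := by
  simp [pvGet2, pvGN, PySem.List.pyGetD_natCast]

lemma pvSet2_coe (m : List (List Int)) (i j : Nat) (v : Int) :
    pvSet2 m (i : Int) (j : Int) v = pvSetN m i j v := by
  simp [pvSet2, pvSetN, PySem.List.pyGetD_natCast, PySem.List.pySetD_natCast]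

-- the port's inner 4-step swap loop = the simultaneous cycle description
lemma pvInner_eq_cyc (n : Nat) (m : List (List Int)) (q : Nat × Nat)
    (hg : pvGood n q) :
    pvInner (n : Int) m (q.1 : Int) (q.2 : Int) = pvCyc n m q := by
  obtain ⟨i, j⟩ := q
  obtain ⟨hij, hn⟩ := hg
  have e1 : (n : Int) - 1 - (i : Int) = ((n-1-i : Nat) : Int) := by omega
  have e2 : (n : Int) - 1 - (j : Int) = ((n-1-j : Nat) : Int) := by omega
  have e3 : (n : Int) - 1 - ((n-1-i : Nat) : Int) = ((i : Nat) : Int) := by omega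
  have e4 : (n : Int) - 1 - ((n-1-j : Nat) : Int) = ((j : Nat) : Int) := by omega
  unfold pvInner
  rw [show List.range 4 = [0,1,2,3] from rfl]
  simp only [List.foldl_cons, List.foldl_nil]
  simp only [e1, e2, e3, e4, pvGet2_coe, pvSet2_coe]
  rw [pvGN_setN_ne m j (n-1-i) (n-1-i) (n-1-j) (pvGN m i j) (Or.inl (by omega))]
  rw [pvGN_setN_ne (pvSetN m j (n-1-i) (pvGN m i j)) (n-1-i) (n-1-j) (n-1-j) i
        (pvGN m j (n-1-i)) (Or.inr (by omega))]
  rw [pvGN_setN_ne m j (n-1-i) (n-1-j) i (pvGN m i j) (Or.inr (by omega))]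
  rfl

-- the cycle, pointwise
lemma pvCyc_spec (n : Nat) (m : List (List Int)) (q : Nat × Nat)
    (hsq : pvSquare n m) (hg : pvGood n q) (a b : Nat) :
    pvGN (pvCyc n m q) a b =
      if (a, b) ∈ pvCells n q then pvGN m (n-1-b) a else pvGN m a b := by
  obtain ⟨i, j⟩ := q
  obtain ⟨hij, hn⟩ := hg
  have sq1 := pvSquare_setN n m j (n-1-i) (pvGN m i j) hsq
  have sq2 := pvSquare_setN n _ (n-1-i) (n-1-j) (pvGN m j (n-1-i)) sq1
  have sq3 := pvSquare_setN n _ (n-1-j) i (pvGN m (n-1-i) (n-1-j)) sq2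
  simp only [pvCells, List.mem_cons, List.not_mem_nil, or_false, Prod.mk.injEq]
  unfold pvCyc
  split_ifs with hmem
  · rcases hmem with ⟨ha, hb⟩ | ⟨ha, hb⟩ | ⟨ha, hb⟩ | ⟨ha, hb⟩ <;> rw [ha, hb]
    · rw [pvGN_setN_self' n _ i j _ sq3 (by omega) (by omega)]
    · rw [pvGN_setN_ne _ i j j (n-1-i) _ (Or.inr (by omega))]
      rw [pvGN_setN_ne _ (n-1-j) i j (n-1-i) _ (Or.inr (by omega))]
      rw [pvGN_setN_ne _ (n-1-i) (n-1-j) j (n-1-i) _ (Or.inl (by omega))]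
      rw [pvGN_setN_self' n _ j (n-1-i) _ hsq (by omega) (by omega)]
      rw [show n-1-(n-1-i) = i from by omega]
    · rw [pvGN_setN_ne _ i j (n-1-i) (n-1-j) _ (Or.inl (by omega))]
      rw [pvGN_setN_ne _ (n-1-j) i (n-1-i) (n-1-j) _ (Or.inr (by omega))]
      rw [pvGN_setN_self' n _ (n-1-i) (n-1-j) _ sq1 (by omega) (by omega)]
      rw [show n-1-(n-1-j) = j from by omega]
    · rw [pvGN_setN_ne _ i j (n-1-j) i _ (Or.inl (by omega))]
      rw [pvGN_setN_self' n _ (n-1-j) i _ sq2 (by omega) (by omega)]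
  · rw [pvGN_setN_ne _ i j a b _ (by omega)]
    rw [pvGN_setN_ne _ (n-1-j) i a b _ (by omega)]
    rw [pvGN_setN_ne _ (n-1-i) (n-1-j) a b _ (by omega)]
    rw [pvGN_setN_ne _ j (n-1-i) a b _ (by omega)]

-- the cells of a cycle are closed under taking the rotation source
lemma pvCells_src (n : Nat) (q : Nat × Nat) (a b : Nat)
    (hg : pvGood n q) (h : (a, b) ∈ pvCells n q) : (n-1-b, a) ∈ pvCells n q := by
  obtain ⟨i, j⟩ := q
  obtain ⟨hij, hn⟩ := hg
  simp only [pvCells, List.mem_cons, List.not_mem_nil, or_false, Prod.mk.injEq] at h ⊢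
  omega

-- two distinct good cycles touch disjoint cells
lemma pvCells_disj (n : Nat) (q q' : Nat × Nat) (hg : pvGood n q) (hg' : pvGood n q')
    (hne : q ≠ q') (p : Nat × Nat) (h : p ∈ pvCells n q) : p ∉ pvCells n q' := by
  obtain ⟨i, j⟩ := q
  obtain ⟨i', j'⟩ := q'
  obtain ⟨hij, hn⟩ := hg
  obtain ⟨hij', hn'⟩ := hg'
  obtain ⟨a, b⟩ := p
  intro h'
  simp only [pvCells, List.mem_cons, List.not_mem_nil, or_false, Prod.mk.injEq] at h h'
  apply hne
  simp only [Prod.mk.injEq]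
  omega

lemma pvIdx_good (n : Nat) (q : Nat × Nat) (h : q ∈ pvIdx n) : pvGood n q := by
  obtain ⟨i, j⟩ := q
  simp only [pvIdx, List.mem_flatMap, List.mem_map, List.mem_range, List.mem_range'_1,
    Prod.mk.injEq] at h
  obtain ⟨i', hi', j', hj', hii, hjj⟩ := h
  constructor <;> omega

lemma pvIdx_nodup (n : Nat) : (pvIdx n).Nodup := by
  rw [pvIdx, List.nodup_flatMap]
  constructor
  · intro i _
    exact List.Nodup.map (fun x y h => by simpa using congrArg Prod.snd h) List.nodup_range'
  · have h0 : List.Pairwise (· ≠ ·) (List.range (n/2)) := List.nodup_range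
    refine h0.imp_of_mem ?_
    intro i i' hi hi' hne p hp hp'
    simp only [List.mem_map, List.mem_range'_1] at hp hp'
    obtain ⟨j, hj, rfl⟩ := hp
    obtain ⟨j', hj', h⟩ := hp'
    simp only [Prod.mk.injEq] at h
    omega

-- coverage: every cell is in some cycle, except the centre of an odd matrix
lemma pvIdx_cover (n a b : Nat) (ha : a < n) (hb : b < n) :
    (a, b) ∈ (pvIdx n).flatMap (pvCells n) ∨ (n = 2*a+1 ∧ b = a) := by
  have hmem : ∀ i j : Nat, i < n/2 → i ≤ j → j < n-1-i → (a,b) ∈ pvCells n (i,j) →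
      (a, b) ∈ (pvIdx n).flatMap (pvCells n) := by
    intro i j h1 h2 h3 h4
    refine List.mem_flatMap.mpr ⟨(i,j), ?_, h4⟩
    simp only [pvIdx, List.mem_flatMap, List.mem_map, List.mem_range, List.mem_range'_1,
      Prod.mk.injEq]
    exact ⟨i, h1, j, ⟨h2, by omega⟩, rfl, rfl⟩
  by_cases c1 : a ≤ b ∧ a + b + 1 < n
  · left
    refine hmem a b (by omega) (by omega) (by omega) ?_
    simp [pvCells]
  by_cases c2 : a < b ∧ n - 1 ≤ a + b
  · left
    refine hmem (n-1-b) a (by omega) (by omega) (by omega) ?_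
    simp only [pvCells, List.mem_cons, List.not_mem_nil, or_false, Prod.mk.injEq]
    rw [show n-1-(n-1-b) = b from by omega]
    simp
  by_cases c3 : b ≤ a ∧ n ≤ a + b
  · left
    refine hmem (n-1-a) (n-1-b) (by omega) (by omega) (by omega) ?_
    simp only [pvCells, List.mem_cons, List.not_mem_nil, or_false, Prod.mk.injEq]
    rw [show n-1-(n-1-a) = a from by omega, show n-1-(n-1-b) = b from by omega]
    simp
  by_cases c4 : b < a ∧ a + b < n
  · left
    refine hmem b (n-1-a) (by omega) (by omega) (by omega) ?_
    simp only [pvCells, List.mem_cons, List.not_mem_nil, or_false, Prod.mk.injEq]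
    rw [show n-1-(n-1-a) = a from by omega]
    simp
  · right
    omega

-- main fold invariant: folding the port's swap over a nodup list of good cycles rotates exactly
-- the covered cells, reading from the matrix M0 the covered cells still agree with
lemma pvFold_inv (n : Nat) (M0 : List (List Int)) :
    ∀ (L : List (Nat × Nat)) (M : List (List Int)),
    pvSquare n M →
    (∀ q ∈ L, pvGood n q) → L.Nodup →
    (∀ p ∈ L.flatMap (pvCells n), pvGN M p.1 p.2 = pvGN M0 p.1 p.2) →
    pvSquare n (L.foldl (fun m q => pvInner (n : Int) m (q.1 : Int) (q.2 : Int)) M) ∧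
    ∀ a b : Nat,
      pvGN (L.foldl (fun m q => pvInner (n : Int) m (q.1 : Int) (q.2 : Int)) M) a b =
        if (a, b) ∈ L.flatMap (pvCells n) then pvGN M0 (n-1-b) a else pvGN M a b := by
  intro L
  induction L with
  | nil =>
    intro M hsq _ _ _
    refine ⟨hsq, ?_⟩
    intro a b
    simp
  | cons q L ih =>
    intro M hsq hgood hnd hagree
    have hgq : pvGood n q := hgood q (List.mem_cons_self ..)
    have hnotmem : q ∉ L := (List.nodup_cons.mp hnd).1
    have hstep : pvInner (n : Int) M (q.1 : Int) (q.2 : Int) = pvCyc n M q :=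
      pvInner_eq_cyc n M q hgq
    have hsq1 : pvSquare n (pvCyc n M q) := pvSquare_cyc n M q hsq
    have hdisj : ∀ p ∈ pvCells n q, p ∉ L.flatMap (pvCells n) := by
      intro p hp hp'
      obtain ⟨q', hq', hpq'⟩ := List.mem_flatMap.mp hp'
      exact pvCells_disj n q q' hgq (hgood q' (List.mem_cons_of_mem _ hq'))
        (by rintro rfl; exact hnotmem hq') p hp hpq'
    have hagree_tail : ∀ p ∈ L.flatMap (pvCells n),
        pvGN (pvCyc n M q) p.1 p.2 = pvGN M0 p.1 p.2 := by
      intro p hp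
      rw [pvCyc_spec n M q hsq hgq p.1 p.2]
      rw [if_neg (fun hc => hdisj _ hc hp)]
      exact hagree p (List.mem_flatMap.mpr (let ⟨q', h1, h2⟩ := List.mem_flatMap.mp hp;
        ⟨q', List.mem_cons_of_mem _ h1, h2⟩))
    obtain ⟨ihsq, ihpt⟩ := ih (pvCyc n M q) hsq1
      (fun q' h => hgood q' (List.mem_cons_of_mem _ h)) (List.nodup_cons.mp hnd).2 hagree_tail
    simp only [List.foldl_cons, hstep]
    refine ⟨ihsq, ?_⟩
    intro a b
    rw [ihpt a b]
    by_cases hL : (a, b) ∈ L.flatMap (pvCells n)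
    · rw [if_pos hL, if_pos]
      rw [List.flatMap_cons, List.mem_append]
      exact Or.inr hL
    · rw [if_neg hL]
      by_cases hq : (a, b) ∈ pvCells n q
      · rw [if_pos (by rw [List.flatMap_cons, List.mem_append]; exact Or.inl hq)]
        rw [pvCyc_spec n M q hsq hgq a b, if_pos hq]
        refine hagree ((n-1-b), a) ?_
        rw [List.flatMap_cons, List.mem_append]
        exact Or.inl (pvCells_src n q a b hgq hq)
      · rw [if_neg (by
          rw [List.flatMap_cons, List.mem_append]
          rintro (h | h)
          · exact hq h
          · exact hL h)]
        rw [pvCyc_spec n M q hsq hgq a b, if_neg hq]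

-- inner loop: pyRange ↑c (↑n - 1 - ↑c) is the Nat range' c (n-1-c-c), mapped
lemma pvInnerRange (n c : Nat) (M : List (List Int)) :
    (PySem.List.pyRange (c : Int) ((n : Int) - 1 - (c : Int)) 1).foldl
        (fun m j => pvInner (n : Int) m (c : Int) j) M
      = (List.range' c (n-1-c-c)).foldl
          (fun (m : List (List Int)) (j : Nat) => pvInner (n : Int) m (c : Int) (j : Int)) M := by
  rw [PySem.List.pyRange_one, List.foldl_map]
  conv_rhs => rw [List.range'_eq_map_range, List.foldl_map]
  rw [show ((n : Int) - 1 - (c : Int) - (c : Int)).toNat = n-1-c-c from by omega]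
  simp only [Nat.cast_add]

lemma pvOuterGo (n : Nat) : ∀ (k c : Nat) (M : List (List Int)),
    ((List.range' c k).foldl
      (fun st (i : Nat) =>
        ((PySem.List.pyRange st.2.1 st.2.2 1).foldl
          (fun m j => pvInner (n : Int) m (i : Int) j) st.1,
         st.2.1 + 1, st.2.2 - 1))
      (M, (c : Int), (n : Int) - 1 - (c : Int))).1
    = (List.range' c k).foldl
        (fun (m : List (List Int)) (i : Nat) => (List.range' i (n-1-i-i)).foldl
          (fun (m : List (List Int)) (j : Nat) => pvInner (n : Int) m (i : Int) (j : Int)) m) M := by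
  intro k
  induction k with
  | zero => intro c M; simp
  | succ k ih =>
    intro c M
    rw [List.range'_succ, List.foldl_cons, List.foldl_cons]
    have h1 : ((c : Int) + 1) = ((c + 1 : Nat) : Int) := by push_cast; ring
    have h2 : ((n : Int) - 1 - (c : Int) - 1) = ((n : Int) - 1 - ((c+1 : Nat) : Int)) := by
      push_cast; ring
    simp only [pvInnerRange n c M, h1, h2]
    exact ih (c+1) _

-- the port's clockwise pass = fold of the swap over the cycle list
lemma pvRotCW_fold (n : Nat) (M : List (List Int)) :
    rotate_matrix_clockwise M (n : Int) =
      (pvIdx n).foldl (fun m q => pvInner (n : Int) m (q.1 : Int) (q.2 : Int)) M := by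
  unfold rotate_matrix_clockwise pvIdx
  rw [show Int.tdiv (n : Int) 2 = ((n / 2 : Nat) : Int) from by rw [Int.tdiv_eq_ediv]; simp]
  rw [PySem.List.pyRange_zero_natCast, List.foldl_map]
  rw [List.foldl_flatMap]
  rw [show ((0:Int)) = ((0:Nat):Int) from by norm_num,
      show (n:Int) - 1 = (n:Int) - 1 - ((0:Nat):Int) from by norm_num]
  rw [List.range_eq_range' , pvOuterGo n (n/2) 0 M]
  simp only [List.foldl_map]

lemma pvSquare_rotN (n : Nat) (M : List (List Int)) : pvSquare n (pvRotN M n) := by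
  constructor
  · simp [pvRotN]
  · intro row hrow
    simp only [pvRotN, List.mem_map] at hrow
    obtain ⟨i, _, rfl⟩ := hrow
    simp

lemma pvEq_of_GN (n : Nat) (X Y : List (List Int)) (hX : pvSquare n X) (hY : pvSquare n Y)
    (h : ∀ a b : Nat, a < n → b < n → pvGN X a b = pvGN Y a b) : X = Y := by
  obtain ⟨hX1, hX2⟩ := hX
  obtain ⟨hY1, hY2⟩ := hY
  apply List.ext_getElem (by omega)
  intro a ha ha'
  apply List.ext_getElem
  · rw [hX2 _ (List.getElem_mem ha), hY2 _ (List.getElem_mem ha')]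
  · intro b hb hb'
    have hbn : b < n := by rw [hX2 _ (List.getElem_mem ha)] at hb; exact hb
    have := h a b (by omega) hbn
    rw [pvGN, pvGN, List.getD_eq_getElem _ _ (by omega : a < X.length),
      List.getD_eq_getElem _ _ (by omega : a < Y.length),
      List.getD_eq_getElem _ _ hb, List.getD_eq_getElem _ _ hb'] at this
    exact this

lemma pvRotN_entry (n : Nat) (M : List (List Int)) (a b : Nat) (ha : a < n) (hb : b < n) :
    pvGN (pvRotN M n) a b = pvGN M (n-1-b) a := by
  have h1 : (pvRotN M n).getD a [] = (List.range n).map (fun j => pvGN M (n-1-j) a) := by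
    unfold pvRotN
    rw [List.getD_eq_getElem _ _ (by simpa using ha), List.getElem_map, List.getElem_range]
  rw [pvGN, h1]
  rw [List.getD_eq_getElem _ _ (by simpa using hb), List.getElem_map, List.getElem_range]

-- A's clockwise pass, characterised
lemma pvA_char (n : Nat) (M : List (List Int)) (hsq : pvSquare n M) :
    rotate_matrix_clockwise M (n : Int) = pvRotN M n := by
  rw [pvRotCW_fold n M]
  obtain ⟨hsq', hpt⟩ := pvFold_inv n M (pvIdx n) M hsq (fun q h => pvIdx_good n q h)
    (pvIdx_nodup n) (fun p _ => rfl)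
  apply pvEq_of_GN n _ _ hsq' (pvSquare_rotN n M)
  intro a b ha hb
  rw [hpt a b, pvRotN_entry n M a b ha hb]
  rcases pvIdx_cover n a b ha hb with hc | ⟨hn, hab⟩
  · rw [if_pos hc]
  · have : ¬ (a, b) ∈ (pvIdx n).flatMap (pvCells n) := by
      intro hmem
      obtain ⟨q, hq, hcell⟩ := List.mem_flatMap.mp hmem
      have hg := pvIdx_good n q hq
      obtain ⟨i, j⟩ := q
      obtain ⟨h1, h2⟩ := hg
      simp only [pvCells, List.mem_cons, List.not_mem_nil, or_false, Prod.mk.injEq] at hcell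
      omega
    rw [if_neg this, hab, show n-1-a = a from by omega]

-- zip(*m), characterised on nonempty matrices with rows of equal length
lemma pvZipStar_char (k : Nat) : ∀ (m : List (List Int)), m ≠ [] →
    (∀ row ∈ m, row.length = k) →
    pvZipStar m = (List.range k).map (fun j => m.map (fun r => r.getD j 0)) := by
  induction k with
  | zero =>
    intro m hne hrow
    obtain ⟨r, rs, rfl⟩ := List.exists_cons_of_ne_nil hne
    rw [pvZipStar]
    rw [if_pos]
    · simp
    · simp only [List.any_cons, Bool.or_eq_true]
      left
      rw [List.isEmpty_iff, List.eq_nil_iff_length_eq_zero]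
      exact hrow r (List.mem_cons_self ..)
  | succ k ih =>
    intro m hne hrow
    obtain ⟨r, rs, rfl⟩ := List.exists_cons_of_ne_nil hne
    rw [pvZipStar]
    rw [if_neg]
    · have hlen : ∀ row ∈ r :: rs, row.length = k + 1 := hrow
      have htail : ∀ row ∈ r.tail :: rs.map List.tail, row.length = k := by
        intro row hr
        rcases List.mem_cons.mp hr with rfl | hr
        · have := hlen r (List.mem_cons_self ..); simp [List.length_tail, this]
        · obtain ⟨row', hrow', rfl⟩ := List.mem_map.mp hr
          have := hlen row' (List.mem_cons_of_mem _ hrow')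
          simp [List.length_tail, this]
      rw [ih _ (by simp) htail]
      rw [List.range_succ_eq_map]
      rw [List.map_cons, List.map_map]
      congr 1
      · have hr0 : r.headD 0 = r.getD 0 0 := by cases r <;> rfl
        simp only [List.map_cons, hr0]
        congr 1
        exact List.map_congr_left (fun q _ => by cases q <;> rfl)
      · congr 1
        funext j
        simp only [Function.comp]
        rw [List.map_cons, List.map_map]
        congr 1
        · cases r <;> rfl
        · exact List.map_congr_left (fun q _ => by cases q <;> rfl)
    · simp only [List.any_cons, Bool.or_eq_true, not_or, List.any_eq_true, List.isEmpty_iff]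
      constructor
      · intro h
        have := hrow r (List.mem_cons_self ..)
        rw [h] at this; simp at this
      · rintro ⟨row, hr, h⟩
        have := hrow row (List.mem_cons_of_mem _ hr)
        rw [h] at this; simp at this

lemma pvMapRow (n : Nat) (M : List (List Int)) (hsq : pvSquare n M) (i : Nat) :
    M.map (fun r => r.getD i 0) = (List.range n).map (fun t => pvGN M t i) := by
  obtain ⟨h1, _⟩ := hsq
  apply List.ext_getElem (by simp [h1])
  intro t ht ht'
  simp only [List.getElem_map, List.getElem_range]
  rw [pvGN, List.getD_eq_getElem _ _ (by simp_all : t < M.length)]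

lemma pvRevRange (n : Nat) (g : Nat → Int) :
    ((List.range n).map g).reverse = (List.range n).map (fun j => g (n-1-j)) := by
  apply List.ext_getElem (by simp)
  intro j hj hj'
  simp only [List.getElem_reverse, List.length_map, List.length_range, List.getElem_map,
    List.getElem_range] at *

-- B's rotation step, characterised
lemma pvB_char (n : Nat) (M : List (List Int)) (hsq : pvSquare n M) :
    (pvZipStar M).map List.reverse = pvRotN M n := by
  obtain ⟨h1, h2⟩ := hsq
  cases n with
  | zero =>
    have : M = [] := by rw [← List.length_eq_zero_iff]; omega
    subst this
    rw [show pvZipStar [] = [] from by rw [pvZipStar]]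
    simp [pvRotN]
  | succ k =>
    have hne : M ≠ [] := by rw [← List.length_pos_iff]; omega
    rw [pvZipStar_char (k+1) M hne h2, List.map_map]
    unfold pvRotN
    apply List.ext_getElem (by simp)
    intro i hi hi'
    simp only [List.getElem_map, List.getElem_range, Function.comp]
    rw [pvMapRow (k+1) M ⟨h1, h2⟩ i, pvRevRange]

-- both per-step functions applied repeatedly give the same result on a square matrix
lemma pvFoldRot (n : Nat) : ∀ (c : Nat) (M : List (List Int)), pvSquare n M →
    (List.range c).foldl (fun m _ => rotate_matrix_clockwise m (n : Int)) M
      = (List.range c).foldl (fun m _ => (pvZipStar m).map List.reverse) M ∧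
    pvSquare n ((List.range c).foldl (fun m _ => (pvZipStar m).map List.reverse) M) := by
  intro c
  induction c with
  | zero => intro M hsq; exact ⟨rfl, hsq⟩
  | succ c ih =>
    intro M hsq
    obtain ⟨he, hs⟩ := ih M hsq
    rw [List.range_succ, List.foldl_append, List.foldl_append]
    simp only [List.foldl_cons, List.foldl_nil]
    rw [he]
    constructor
    · rw [pvA_char n _ hs, pvB_char n _ hs]
    · rw [pvB_char n _ hs]
      exact pvSquare_rotN n _

lemma pvCount_eq (degree : Int) :
    (if 0 ≤ degree then degree.natAbs % 360 / 90 else 4 - (degree.natAbs % 360 + 89) / 90)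
      = (if 0 ≤ degree then degree.natAbs % 360 / 90 else (360 - degree.natAbs % 360) / 90) := by
  have h : degree.natAbs % 360 < 360 := Nat.mod_lt _ (by omega)
  split <;> omega

-- ===== VERDICT (by name: the statement is the Claim_ definition above) =====
theorem rotate_matrix_multiple_times_spec : Claim_equal_rotate_matrix_multiple_times := by
  unfold Claim_equal_rotate_matrix_multiple_times
  intro array2d size degree _ hPre
  unfold Spec_rotate_matrix_multiple_times
  unfold rotate_matrix_multiple_times rotate_matrix_multiple_times_alt
  simp only []
  rw [pvCount_eq degree]
  rcases hPre with hzero | ⟨hs, hlen, hrow⟩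
  · have hc : (if 0 ≤ degree then degree.natAbs % 360 / 90
        else (360 - degree.natAbs % 360) / 90) = 0 := by
      split_ifs at hzero ⊢ with hd <;> omega
    rw [hc]
    rfl
  · have hsize : size = ((size.toNat : Nat) : Int) := (Int.toNat_of_nonneg hs).symm
    rw [hsize]
    exact (pvFoldRot size.toNat _ array2d ⟨hlen, hrow⟩).1
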